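-- pv_equiv track=rewrite | github.com/FMI-Test/WhoDat | src/util.py | to_len
-- ===== SOURCE A (Python) =====
-- CFG_LEN_SIZE = 120
--
-- CFG_REP = '#'
--
-- def to_len(string=CFG_REP, delimeter=CFG_REP, width=CFG_LEN_SIZE):
--     """Returns 'string' with following 'delimeter' up to given 'width'
--
--     Args:
--         string    (str): Optional string. default #
--         delimeter (str): Optional string. default #
--         width     (int): Optional width. default CFG_LEN_SIZE
--     """
--     string = ' ' if len(string) == 0 else string
--     delimeter = ' ' if not delimeter else delimeter
--     spc = string if string == delimeter else ' '
--     res = string + spc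
--     while len(res) < width:
--         res += delimeter
--
--     return res
-- ===== SOURCE B (Python) =====
-- CFG_LEN_SIZE = 120
--
-- CFG_REP = '#'
--
-- def to_len(string=CFG_REP, delimeter=CFG_REP, width=CFG_LEN_SIZE):
--     """Same guards as the original, but the padding is computed in one shot:
--     append ceil(remaining/len(delimeter)) copies of the delimeter."""
--     string = ' ' if len(string) == 0 else string
--     delimeter = ' ' if not delimeter else delimeter
--     spc = string if string == delimeter else ' '
--     res = string + spc
--     remaining = width - len(res)
--     if remaining > 0:
--         res += delimeter * ((remaining + len(delimeter) - 1) // len(delimeter))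
--     return res
-- ===== Notes on version B (the rewrite author's own statement) =====
-- stated objective: faster
-- what changed: Replaces the one-copy-at-a-time while-loop with a closed-form ceiling-division count of delimeter copies appended in a single repetition.
import Mathlib
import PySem

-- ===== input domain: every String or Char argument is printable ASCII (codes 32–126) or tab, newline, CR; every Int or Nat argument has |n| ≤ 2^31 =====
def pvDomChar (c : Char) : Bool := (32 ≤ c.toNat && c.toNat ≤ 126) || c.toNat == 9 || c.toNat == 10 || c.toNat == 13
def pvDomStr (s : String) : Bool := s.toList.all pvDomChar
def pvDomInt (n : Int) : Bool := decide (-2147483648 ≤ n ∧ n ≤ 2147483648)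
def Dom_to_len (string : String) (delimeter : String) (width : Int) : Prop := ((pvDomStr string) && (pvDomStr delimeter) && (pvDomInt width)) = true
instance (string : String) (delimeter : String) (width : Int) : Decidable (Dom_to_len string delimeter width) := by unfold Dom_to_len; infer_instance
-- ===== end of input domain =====

-- B replaces A's append-one-copy-at-a-time while-loop by a single closed-form
-- ceiling-division repetition of the delimeter (avoids repeated string re-copying).

-- ===== PORT A =====
-- the while-loop: res += delimeter while len(res) < width
-- (the 'd = []' guard only makes the recursion total; A's guards ensure d ≠ [])
def to_len_loop (width : Int) (d : List Char) (res : List Char) : List Char :=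
  if d.length = 0 then res
  else if (res.length : Int) < width then to_len_loop width d (res ++ d)
  else res
termination_by (width - res.length).toNat
decreasing_by simp; omega

def to_len (string : String) (delimeter : String) (width : Int) : String :=
  let s := if string.toList = [] then [' '] else string.toList
  let d := if delimeter.toList = [] then [' '] else delimeter.toList
  let spc := if s = d then s else [' ']
  String.mk (to_len_loop width d (s ++ spc))

-- ===== PORT B =====
def to_len_alt (string : String) (delimeter : String) (width : Int) : String :=
  let s := if string.toList = [] then [' '] else string.toList
  let d := if delimeter.toList = [] then [' '] else delimeter.toList
  let spc := if s = d then s else [' ']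
  let res := s ++ spc
  let remaining : Int := width - res.length
  if remaining > 0 then
    String.mk (res ++ (List.replicate ((PySem.Int.floordiv (remaining + d.length - 1) d.length).toNat) d).flatten)
  else
    String.mk res

-- ===== PRECONDITION & SPEC =====
def Spec_to_len (string : String) (delimeter : String) (width : Int) (out : String) : Prop := out = to_len_alt string delimeter width
instance (string : String) (delimeter : String) (width : Int) (out : String) : Decidable (Spec_to_len string delimeter width out) := by unfold Spec_to_len; infer_instance

-- ===== CLAIM (what is proved, stated in full; the proofs are below) =====
def Claim_equal_to_len : Prop := ∀ (string : String) (delimeter : String) (width : Int), Dom_to_len string delimeter width → Spec_to_len string delimeter width (to_len string delimeter width)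

-- ===== LEMMAS AND PROOFS =====

-- one loop step peels one copy off the ceiling-division count
theorem ceil_step (r L : Int) (hL : 0 < L) (hr : 0 < r) :
    (PySem.Int.floordiv (r + L - 1) L).toNat =
      (if 0 < r - L then (PySem.Int.floordiv (r - L + L - 1) L).toNat else 0) + 1 := by
  rw [PySem.Int.floordiv_eq_ediv_of_pos hL]
  split
  · rw [PySem.Int.floordiv_eq_ediv_of_pos hL]
    have e : r + L - 1 = (r - L + L - 1) + 1 * L := by ring
    rw [e, Int.add_mul_ediv_right _ _ (by omega)]
    have h0 : 0 ≤ (r - L + L - 1) / L := Int.ediv_nonneg (by omega) (by omega)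
    omega
  · have e : r + L - 1 = (r - 1) + 1 * L := by ring
    rw [e, Int.add_mul_ediv_right _ _ (by omega)]
    rw [Int.ediv_eq_zero_of_lt (by omega) (by omega)]
    decide

-- the loop appends exactly ceil((width - |res|)/|d|) copies of d (when the gap is positive)
theorem to_len_loop_closed (width : Int) (d res : List Char) (hd : 0 < d.length) :
    to_len_loop width d res =
      res ++ (List.replicate (if 0 < width - (res.length : Int) then
          (PySem.Int.floordiv (width - res.length + d.length - 1) d.length).toNat else 0) d).flatten := by
  fun_induction to_len_loop width d res with
  | case1 res h => omega
  | case2 res h1 h2 ih =>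
      have hL : (0:Int) < (d.length : Int) := by exact_mod_cast hd
      rw [ih, if_pos (by omega : (0:Int) < width - (res.length : Int)),
        ceil_step (width - (res.length : Int)) (d.length : Int) hL (by omega)]
      have harg : width - (res.length : Int) - d.length + d.length - 1
          = width - ((res ++ d).length : Int) + d.length - 1 := by
        simp [List.length_append]; ring
      have hcond : (0 < width - (res.length : Int) - d.length)
          = (0 < width - ((res ++ d).length : Int)) := by
        simp [List.length_append]; constructor <;> (intro; push_cast at *; omega)
      simp only [harg, hcond]
      rw [List.replicate_succ, List.flatten_cons, List.append_assoc]
  | case3 res h1 h2 =>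
      rw [if_neg (by omega)]
      simp

-- ===== VERDICT (by name: the statement is the Claim_ definition above) =====
theorem to_len_spec : Claim_equal_to_len := by
  intro string delimeter width _
  unfold Spec_to_len
  simp only [to_len, to_len_alt]
  have hd : 0 < (if delimeter.toList = [] then [' '] else delimeter.toList).length := by
    split
    · simp
    · rename_i h; exact List.length_pos_iff.mpr h
  rw [to_len_loop_closed _ _ _ hd]
  split_ifs <;> simp
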